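-- pv_equiv track=rewrite | github.com/przecze/wizardle | preprocessing/build_chapters.py | compute_valid_starts
-- ===== SOURCE A (Python) =====
-- import collections
--
-- BOUNDARY_MARGIN = 15  # tokens from chapter boundary
--
-- DASH_TOKENS  = {"—", "..."}   # standalone tokens skipped in bigrams
--
-- def non_dash_pairs(tokens: list[str]) -> list[tuple[int, int]]:
--     """
--     Return list of (i, j) where tokens[i] and tokens[j] are adjacent
--     non-dash tokens (only dash/ellipsis tokens may appear between them).
--     """
--     nd_indices = [i for i, t in enumerate(tokens) if t not in DASH_TOKENS]
--     pairs = []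
--     for k in range(len(nd_indices) - 1):
--         i, j = nd_indices[k], nd_indices[k + 1]
--         between = tokens[i + 1:j]
--         if all(t in DASH_TOKENS for t in between):
--             pairs.append((i, j))
--     return pairs
--
-- def compute_valid_starts(chapters: list[dict]) -> list[set[int]]:
--     """
--     For each chapter (by index in `chapters`), return the set of token
--     positions that are valid_start=1.
--
--     A bigram at position i is valid if:
--       1. The bigram string appears exactly once across all chapters.
--       2. i >= BOUNDARY_MARGIN and i <= len(tokens) - BOUNDARY_MARGIN - 1.
--     """
--     # Step 1: count all bigrams across all chapters
--     bigram_counter: collections.Counter = collections.Counter()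
--     for ch in chapters:
--         tokens = ch["tokens"]
--         for i, j in non_dash_pairs(tokens):
--             bigram = f"{tokens[i]} {tokens[j]}"
--             bigram_counter[bigram] += 1
--
--     unique_bigrams = {b for b, c in bigram_counter.items() if c == 1}
--
--     # Step 2: for each chapter, find valid start positions
--     valid_sets: list[set[int]] = []
--     for ch in chapters:
--         tokens  = ch["tokens"]
--         n       = len(tokens)
--         valid_p: set[int] = set()
--         for i, j in non_dash_pairs(tokens):
--             bigram = f"{tokens[i]} {tokens[j]}"
--             if bigram in unique_bigrams:
--                 if i >= BOUNDARY_MARGIN and i <= n - BOUNDARY_MARGIN - 1: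
--                     valid_p.add(i)
--         valid_sets.append(valid_p)
--
--     return valid_sets
-- ===== SOURCE B (Python) =====
-- BOUNDARY_MARGIN = 15  # tokens from chapter boundary
--
-- DASH_TOKENS = {"—", "..."}   # standalone tokens skipped in bigrams
--
--
-- def compute_valid_starts(chapters: list[dict]) -> list[set[int]]:
--     # Group-by instead of count-then-reselect: one streaming pass over the
--     # tokens detects adjacent non-dash pairs with a running `prev` index (no
--     # index list, no between-slice scan) and groups every bigram occurrence
--     # by its bigram string.  The answer is then read off the GROUPS: a bigram
--     # is usable iff its group is a singleton, so we iterate over the groups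
--     # once and keep the lone occurrence when it lies within the margins.
--     groups: dict = {}  # bigram -> list of (chapter_index, position, n_tokens)
--     for ci, ch in enumerate(chapters):
--         tokens = ch["tokens"]
--         n = len(tokens)
--         prev = None  # index of the previous non-dash token, if any
--         for idx, tok in enumerate(tokens):
--             if tok in DASH_TOKENS:
--                 continue
--             if prev is not None:
--                 groups.setdefault(f"{tokens[prev]} {tok}", []).append((ci, prev, n))
--             prev = idx
--     valid_sets = [set() for _ in chapters]
--     for occs in groups.values():
--         if len(occs) == 1:
--             ci, i, n = occs[0]
--             if BOUNDARY_MARGIN <= i <= n - BOUNDARY_MARGIN - 1: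
--                 valid_sets[ci].add(i)
--     return valid_sets
-- ===== Notes on version B (the rewrite author's own statement) =====
-- stated objective: alternative
-- what changed: B replaces A's count-then-rescan strategy (Counter over two full non_dash_pairs passes, with a per-pair between-slice scan) by a group-by: one streaming token pass with a running prev-index detects adjacent non-dash pairs and buckets every occurrence (chapter, position, length) under its bigram string; the answer is read off the groups themselves, keeping the lone occurrence of each singleton group, so chapters are never re-scanned and no global unique-set is built.
import Mathlib
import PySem

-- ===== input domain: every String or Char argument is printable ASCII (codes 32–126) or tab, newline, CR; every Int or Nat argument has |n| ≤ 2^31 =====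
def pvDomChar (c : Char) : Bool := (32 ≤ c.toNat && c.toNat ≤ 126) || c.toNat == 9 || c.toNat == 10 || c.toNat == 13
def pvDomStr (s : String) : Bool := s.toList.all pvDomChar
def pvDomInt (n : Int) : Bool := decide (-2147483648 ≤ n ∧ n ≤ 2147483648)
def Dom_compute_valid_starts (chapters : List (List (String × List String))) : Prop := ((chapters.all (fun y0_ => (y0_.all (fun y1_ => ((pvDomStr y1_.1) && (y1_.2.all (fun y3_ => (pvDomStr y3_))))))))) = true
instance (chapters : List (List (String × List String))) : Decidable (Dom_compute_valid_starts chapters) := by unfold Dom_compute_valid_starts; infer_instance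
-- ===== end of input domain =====

-- B replaces A's count-then-rescan (Counter over two non_dash_pairs passes with a per-pair
-- between-slice scan) by a group-by: one streaming token pass with a running prev index
-- buckets every bigram occurrence under its bigram string, and the answer is read off the
-- singleton groups (objective: alternative).
-- Shared helpers (identical subexpressions of both Pythons):
-- DASH_TOKENS
def pvDash : PySem.Set String := PySem.Set.ofList ["—", "..."]
-- [i for i, t in enumerate(tokens) if t not in DASH_TOKENS]   (A's non_dash_pairs)
def pvNd (tokens : List String) : List Int :=
  ((PySem.List.enumerate tokens).filter (fun p => !(PySem.Set.contains pvDash p.2))).map (fun p => p.1)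
-- ch["tokens"]  (total form; Pre_ guarantees the key is present, where Python raises KeyError)
def pvTok (ch : List (String × List String)) : List String :=
  (PySem.Dict.get? (PySem.Dict.mk ch) "tokens").getD []
-- the bigram string f"{tokens[i]} {tokens[j]}" = " ".join([tokens[i], tokens[j]]) (exact)
def pvBigram (tokens : List String) (ij : Int × Int) : String :=
  PySem.Str.join " " [PySem.List.pyGetD tokens ij.1 "", PySem.List.pyGetD tokens ij.2 ""]

-- ===== PORT A =====
def non_dash_pairs (tokens : List String) : List (Int × Int) :=
  let nd := pvNd tokens
  (PySem.List.pyRange 0 (PySem.List.len nd - 1)).foldl (fun pairs k =>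
    let i := PySem.List.pyGetD nd k 0
    let j := PySem.List.pyGetD nd (k + 1) 0
    let between := PySem.List.slice tokens (some (i + 1)) (some j)
    if between.all (fun t => PySem.Set.contains pvDash t) then pairs ++ [(i, j)] else pairs) []

def compute_valid_starts (chapters : List (List (String × List String))) : List (List Int) :=
  -- Step 1: count all bigrams across all chapters
  let bigram_counter : PySem.Dict String Int :=
    chapters.foldl (fun bc ch =>
      let tokens := pvTok ch
      (non_dash_pairs tokens).foldl (fun bc ij => bc.modify (pvBigram tokens ij) 0 (· + 1)) bc)
      PySem.Dict.empty
  let unique_bigrams : PySem.Set String :=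
    PySem.Set.ofList ((bigram_counter.items.filter (fun p => p.2 == 1)).map (fun p => p.1))
  -- Step 2: for each chapter, find valid start positions
  chapters.foldl (fun valid_sets ch =>
    let tokens := pvTok ch
    let n := PySem.List.len tokens
    let valid_p : PySem.Set Int :=
      (non_dash_pairs tokens).foldl (fun vp ij =>
        if PySem.Set.contains unique_bigrams (pvBigram tokens ij) then
          if 15 ≤ ij.1 ∧ ij.1 ≤ n - 15 - 1 then PySem.Set.add vp ij.1 else vp
        else vp) PySem.Set.empty
    valid_sets ++ [valid_p]) []

-- ===== PORT B =====
-- the body of B's inner token loop after the dash test (prev = None / prev = pv)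
def pvBStep' (ci : Int) (tokens : List String) (n : Int)
    (s : PySem.Dict String (List (Int × Int × Int)) × Option Int) (p : Int × String) :
    PySem.Dict String (List (Int × Int × Int)) × Option Int :=
  match s.2 with
  | none => (s.1, some p.1)
  | some pv =>
    (s.1.modify (PySem.Str.join " " [PySem.List.pyGetD tokens pv "", p.2]) []
       (· ++ [(ci, pv, n)]), some p.1)

-- one iteration of B's inner loop: 'if tok in DASH_TOKENS: continue' then the prev logic
def pvBStep (ci : Int) (tokens : List String) (n : Int)
    (s : PySem.Dict String (List (Int × Int × Int)) × Option Int) (p : Int × String) :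
    PySem.Dict String (List (Int × Int × Int)) × Option Int :=
  if PySem.Set.contains pvDash p.2 then s else pvBStep' ci tokens n s p

def compute_valid_starts_alt (chapters : List (List (String × List String))) : List (List Int) :=
  -- one streaming pass: bucket every bigram occurrence (ci, prev, n) under its bigram string
  let groups : PySem.Dict String (List (Int × Int × Int)) :=
    (PySem.List.enumerate chapters).foldl (fun groups cich =>
      let tokens := pvTok cich.2
      let n := PySem.List.len tokens
      ((PySem.List.enumerate tokens).foldl (pvBStep cich.1 tokens n)
        (groups, (none : Option Int))).1)
      PySem.Dict.empty
  let valid_sets : List (PySem.Set Int) := chapters.map (fun _ => PySem.Set.empty)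
  -- read the answer off the groups: keep the lone occurrence of each singleton group
  groups.values.foldl (fun vs occs =>
    if PySem.List.len occs == 1 then
      let r := PySem.List.pyGetD occs 0 ((0 : Int), (0 : Int), (0 : Int))
      if 15 ≤ r.2.1 ∧ r.2.1 ≤ r.2.2 - 15 - 1 then
        vs.modify r.1.toNat (fun s => PySem.Set.add s r.2.1)
      else vs
    else vs) valid_sets

-- ===== PRECONDITION & SPEC =====
-- Pre_ excludes exactly the chapters without a "tokens" key, on which both Pythons raise KeyError.
def Pre_compute_valid_starts (chapters : List (List (String × List String))) : Prop :=
  ∀ ch ∈ chapters, "tokens" ∈ ch.map Prod.fst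
instance (chapters : List (List (String × List String))) : Decidable (Pre_compute_valid_starts chapters) := by unfold Pre_compute_valid_starts; infer_instance
def pvWitness_compute_valid_starts : (List (List (String × List String))) :=
  [[("tokens", ["a", "b"])], [("tokens", [])]]
def Spec_compute_valid_starts (chapters : List (List (String × List String))) (out : List (List Int)) : Prop := out = compute_valid_starts_alt chapters
instance (chapters : List (List (String × List String))) (out : List (List Int)) : Decidable (Spec_compute_valid_starts chapters out) := by unfold Spec_compute_valid_starts; infer_instance

-- ===== CLAIM (what is proved, stated in full; the proofs are below) =====
def Claim_equal_compute_valid_starts : Prop := ∀ (chapters : List (List (String × List String))), Dom_compute_valid_starts chapters → Pre_compute_valid_starts chapters → Spec_compute_valid_starts chapters (compute_valid_starts chapters)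

-- ===== LEMMAS AND PROOFS =====

-- proof-side abbreviations
def pvPairs (tokens : List String) : List (Int × Int) := (pvNd tokens).zip (pvNd tokens).tail

-- the flat occurrence index: (bigram, chapter index, start position, chapter length)
def pvGRecs (ci : Int) (ch : List (String × List String)) : List (String × Int × Int × Int) :=
  (pvPairs (pvTok ch)).map (fun ij => (pvBigram (pvTok ch) ij, ci, ij.1, PySem.List.len (pvTok ch)))

def pvRS (chapters : List (List (String × List String))) : List (String × Int × Int × Int) :=
  (PySem.List.enumerate chapters).flatMap (fun c => pvGRecs c.1 c.2)

def pvBGS (chapters : List (List (String × List String))) : List String :=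
  (pvRS chapters).map Prod.fst

def pvOK (chapters : List (List (String × List String))) (tokens : List String) (ij : Int × Int) : Bool :=
  ((pvBGS chapters).count (pvBigram tokens ij) == 1) && decide (15 ≤ ij.1) &&
    decide (ij.1 ≤ PySem.List.len tokens - 15 - 1)

def pvCond (chapters : List (List (String × List String))) (r : String × Int × Int × Int) : Bool :=
  ((pvBGS chapters).count r.1 == 1) && decide (15 ≤ r.2.2.1) && decide (r.2.2.1 ≤ r.2.2.2 - 15 - 1)

def pvChapSet (chapters : List (List (String × List String))) (ch : List (String × List String)) : PySem.Set Int :=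
  ((pvPairs (pvTok ch)).filter (pvOK chapters (pvTok ch))).foldl
    (fun x ij => PySem.Set.add x ij.1) PySem.Set.empty

-- B's margin-checked add (record (ci, i, n))
def pvMStep (vs : List (PySem.Set Int)) (r : Int × Int × Int) : List (PySem.Set Int) :=
  if 15 ≤ r.2.1 ∧ r.2.1 ≤ r.2.2 - 15 - 1 then
    vs.modify r.1.toNat (fun s => PySem.Set.add s r.2.1) else vs

-- unconditional slot add on a full record
def pvSlot (vs : List (PySem.Set Int)) (r : String × Int × Int × Int) : List (PySem.Set Int) :=
  vs.modify r.2.1.toNat (fun s => PySem.Set.add s r.2.2.1)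

lemma pv_mem_enumerate {α : Type} (xs : List α) (s : Int) (p : Int × α) (hp : p ∈ PySem.List.enumerate xs s) :
    ∃ k : Nat, ∃ h : k < xs.length, p = (s + k, xs[k]) := by
  rw [List.mem_iff_getElem] at hp
  obtain ⟨k, hk, he⟩ := hp
  have hl : k < xs.length := by
    have := PySem.List.length_enumerate xs s; omega
  exact ⟨k, hl, by rw [← he, PySem.List.getElem_enumerate]⟩

lemma pv_enumerate_mem {α : Type} (xs : List α) (s : Int) (k : Nat) (h : k < xs.length) :
    (s + (k : Int), xs[k]) ∈ PySem.List.enumerate xs s := by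
  rw [List.mem_iff_getElem]
  refine ⟨k, ?_, ?_⟩
  · rw [PySem.List.length_enumerate]; exact h
  · rw [PySem.List.getElem_enumerate]

lemma pv_enumerate_pairwise {α : Type} (xs : List α) (s : Int) :
    (PySem.List.enumerate xs s).Pairwise (fun p q => p.1 < q.1) := by
  rw [List.pairwise_iff_getElem]
  intro i j hi hj hij
  simp only [PySem.List.getElem_enumerate]
  omega

lemma pv_enumerate_map_snd {α : Type} (xs : List α) (s : Int) :
    (PySem.List.enumerate xs s).map Prod.snd = xs := by
  apply List.ext_getElem
  · simp
  · intro i h1 h2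
    simp

lemma pv_nd_pairwise (tokens : List String) : (pvNd tokens).Pairwise (· < ·) := by
  unfold pvNd
  rw [List.pairwise_map]
  exact (pv_enumerate_pairwise tokens 0).filter _

lemma pv_mem_nd (tokens : List String) (m : Int) :
    m ∈ pvNd tokens ↔ ∃ k : Nat, ∃ h : k < tokens.length, m = (k : Int) ∧ ¬(PySem.Set.contains pvDash tokens[k] = true) := by
  unfold pvNd
  simp only [List.mem_map, List.mem_filter]
  constructor
  · rintro ⟨p, ⟨hpm, hpf⟩, rfl⟩
    obtain ⟨k, hk, rfl⟩ := pv_mem_enumerate tokens 0 p hpm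
    refine ⟨k, hk, by simp, ?_⟩
    simpa using hpf
  · rintro ⟨k, hk, rfl, hnd⟩
    refine ⟨((k : Int), tokens[k]), ⟨?_, by simpa using hnd⟩, rfl⟩
    have := pv_enumerate_mem tokens 0 k hk
    simpa using this

lemma pv_nd_getElem_nat (tokens : List String) (k : Nat) (hk : k < (pvNd tokens).length) :
    ∃ a : Nat, ∃ ha : a < tokens.length, (pvNd tokens)[k] = (a : Int) ∧
      ¬(PySem.Set.contains pvDash tokens[a] = true) := by
  have hm : (pvNd tokens)[k] ∈ pvNd tokens := List.getElem_mem hk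
  rw [pv_mem_nd] at hm
  obtain ⟨a, ha, he, hnd⟩ := hm
  exact ⟨a, ha, he, hnd⟩

lemma pv_between_dash (tokens : List String) (k : Nat) (hk : k + 1 < (pvNd tokens).length) :
    (PySem.List.slice tokens (some ((pvNd tokens)[k]'(by omega) + 1)) (some ((pvNd tokens)[k+1]'hk))).all
      (fun t => PySem.Set.contains pvDash t) = true := by
  obtain ⟨a, ha, hea, _⟩ := pv_nd_getElem_nat tokens k (by omega)
  obtain ⟨b, hb, heb, _⟩ := pv_nd_getElem_nat tokens (k+1) hk
  have hab : (a : Int) < (b : Int) := by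
    rw [← hea, ← heb]
    exact (List.pairwise_iff_getElem.mp (pv_nd_pairwise tokens)) k (k+1) (by omega) hk (by omega)
  rw [hea, heb]
  have : ((a : Int) + 1) = ((a + 1 : Nat) : Int) := by push_cast; ring
  rw [this, PySem.List.slice_natCast]
  rw [List.all_eq_true]
  intro t ht
  rw [List.mem_iff_getElem] at ht
  obtain ⟨i, hi, rfl⟩ := ht
  have hlen : i < b - (a + 1) := by
    have h1 := List.length_take_le (b - (a+1)) (tokens.drop (a+1))
    have := hi; simp [List.length_take, List.length_drop] at this; omega
  have hgl : ((tokens.drop (a+1)).take (b - (a+1)))[i] = tokens[a + 1 + i]'(by omega) := by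
    rw [List.getElem_take, List.getElem_drop]
  rw [hgl]
  by_contra hc
  have hmem : ((a + 1 + i : Nat) : Int) ∈ pvNd tokens := by
    rw [pv_mem_nd]
    exact ⟨a + 1 + i, by omega, rfl, by simpa using hc⟩
  rw [List.mem_iff_getElem] at hmem
  obtain ⟨p, hp, hep⟩ := hmem
  have hpw := List.pairwise_iff_getElem.mp (pv_nd_pairwise tokens)
  rcases lt_trichotomy p k with h | h | h
  · have := hpw p k hp (by omega) h
    rw [hep, hea] at this
    omega
  · subst h; rw [hea] at hep; omega
  · rcases lt_trichotomy p (k+1) with h2 | h2 | h2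
    · omega
    · subst h2; rw [heb] at hep; omega
    · have := hpw (k+1) p hk hp h2
      rw [hep, heb] at this
      omega

lemma pv_non_dash_pairs_eq (tokens : List String) : non_dash_pairs tokens = pvPairs tokens := by
  unfold non_dash_pairs pvPairs
  simp only [PySem.List.len_eq]
  set nd := pvNd tokens with hnd
  have hrange : ((nd.length : Int) - 1) = (((nd.length - 1 : Nat)) : Int) ∨ nd.length = 0 := by
    rcases Nat.eq_zero_or_pos nd.length with h | h
    · right; exact h
    · left; omega
  rcases hrange with h | h
  · rw [h, PySem.List.pyRange_zero_nat, List.foldl_map]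
    have hcong := PySem.List.foldl_congr_mem (List.range (nd.length - 1))
      (fun pairs k =>
        if (PySem.List.slice tokens (some (PySem.List.pyGetD nd (k : Int) 0 + 1)) (some (PySem.List.pyGetD nd ((k : Int) + 1) 0))).all
            (fun t => PySem.Set.contains pvDash t) then pairs ++ [(PySem.List.pyGetD nd (k : Int) 0, PySem.List.pyGetD nd ((k : Int) + 1) 0)] else pairs)
      (fun pairs k => pairs ++ [((nd.getD k 0, nd.getD (k+1) 0) : Int × Int)])
      [] ?_
    · rw [hcong, PySem.List.foldl_append_singleton_eq_map]
      simp only [List.nil_append]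
      apply List.ext_getElem
      · simp [List.length_zip, List.length_tail]
      · intro i hi1 hi2
        simp only [List.getElem_map, List.getElem_range, List.getElem_zip, List.getElem_tail]
        have h1 : i < nd.length := by simp at hi1; omega
        have h2 : i + 1 < nd.length := by simp at hi1; omega
        rw [List.getD_eq_getElem _ _ h1, List.getD_eq_getElem _ _ h2]
    · intro acc k hk
      rw [List.mem_range] at hk
      have hk1 : k + 1 < nd.length := by omega
      have g1 : PySem.List.pyGetD nd (k : Int) 0 = nd[k]'(by omega) := by
        rw [PySem.List.pyGetD_natCast, List.getD_eq_getElem]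
      have g2 : PySem.List.pyGetD nd ((k : Int) + 1) 0 = nd[k+1]'hk1 := by
        have : ((k : Int) + 1) = ((k + 1 : Nat) : Int) := by push_cast; ring
        rw [this, PySem.List.pyGetD_natCast, List.getD_eq_getElem]
      beta_reduce
      rw [g1, g2]
      rw [if_pos (pv_between_dash tokens k hk1)]
      rw [List.getD_eq_getElem _ _ (by omega : k < nd.length), List.getD_eq_getElem _ _ hk1]
  · rw [List.length_eq_zero_iff] at h
    rw [h]
    simp [PySem.List.pyRange_one_eq_nil]

-- ===== A side: the counter is Counter(pvBGS), the unique test is count == 1 =====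

lemma pv_int_count_beq (c : Nat) : (((c : Int)) == (1 : Int)) = (c == 1) := by
  rw [Bool.eq_iff_iff]
  simp [beq_iff_eq]

lemma pv_counterA_eq (chapters : List (List (String × List String))) :
    chapters.foldl (fun bc ch =>
      (non_dash_pairs (pvTok ch)).foldl (fun bc ij => bc.modify (pvBigram (pvTok ch) ij) 0 (· + 1)) bc)
      PySem.Dict.empty = PySem.Dict.counter (pvBGS chapters) := by
  rw [PySem.Dict.counter_eq_foldl]
  unfold pvBGS pvRS
  rw [List.map_flatMap]
  rw [List.foldl_flatMap]
  have h2 : ∀ (init : PySem.Dict String Int),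
      (PySem.List.enumerate chapters).foldl
        (fun acc c => ((pvGRecs c.1 c.2).map Prod.fst).foldl (fun d x => d.modify x 0 (· + 1)) acc) init
      = ((PySem.List.enumerate chapters).map Prod.snd).foldl
        (fun bc ch => (non_dash_pairs (pvTok ch)).foldl (fun bc ij => bc.modify (pvBigram (pvTok ch) ij) 0 (· + 1)) bc) init := by
    intro init
    rw [List.foldl_map]
    apply PySem.List.foldl_congr_mem
    intro acc c _
    unfold pvGRecs
    rw [List.map_map, pv_non_dash_pairs_eq, List.foldl_map]
    rfl
  rw [h2, pv_enumerate_map_snd]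

lemma pv_unique_contains (d : PySem.Dict String Int) (hd : d.keys.Nodup) (bg : String) :
    PySem.Set.contains (PySem.Set.ofList ((d.items.filter (fun p => p.2 == 1)).map (fun p => p.1))) bg
      = (d.getD bg 0 == 1) := by
  rw [Bool.eq_iff_iff]
  rw [PySem.Set.contains_iff, PySem.Set.mem_ofList]
  simp only [List.mem_map, List.mem_filter, beq_iff_eq]
  constructor
  · rintro ⟨⟨k, v⟩, ⟨hmem, hv⟩, rfl⟩
    rw [PySem.Dict.getD_of_mem_items d hmem hd]
    exact hv
  · intro h
    refine ⟨(bg, 1), ⟨?_, rfl⟩, rfl⟩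
    by_cases hc : d.contains bg = true
    · rw [PySem.Dict.contains_eq_isSome_get?] at hc
      obtain ⟨v, hv⟩ := Option.isSome_iff_exists.mp hc
      have := PySem.Dict.getD_of_get?_eq_some d (0 : Int) hv
      rw [this] at h
      subst h
      exact PySem.Dict.mem_items_of_get?_eq_some d hv
    · rw [PySem.Dict.getD_of_not_contains d (0 : Int) (by simpa using hc)] at h
      omega

lemma pv_chapsetA (chapters : List (List (String × List String))) (ch : List (String × List String)) :
    (non_dash_pairs (pvTok ch)).foldl (fun vp ij =>
        if PySem.Set.contains (PySem.Set.ofList (((PySem.Dict.counter (pvBGS chapters)).items.filter (fun p => p.2 == 1)).map (fun p => p.1))) (pvBigram (pvTok ch) ij) then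
          if 15 ≤ ij.1 ∧ ij.1 ≤ PySem.List.len (pvTok ch) - 15 - 1 then PySem.Set.add vp ij.1 else vp
        else vp) PySem.Set.empty
      = pvChapSet chapters ch := by
  rw [pv_non_dash_pairs_eq]
  unfold pvChapSet
  rw [List.foldl_filter]
  apply PySem.List.foldl_congr_mem
  intro acc ij _
  beta_reduce
  rw [pv_unique_contains _ (PySem.Dict.nodup_keys_counter _) (pvBigram (pvTok ch) ij),
    PySem.Dict.getD_counter, pv_int_count_beq]
  unfold pvOK
  by_cases h1 : ((pvBGS chapters).count (pvBigram (pvTok ch) ij) == 1) = true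
  · by_cases h2 : 15 ≤ ij.1
    · by_cases h3 : ij.1 ≤ PySem.List.len (pvTok ch) - 15 - 1
      · simp [h1, h2]
      · simp [h1, h2]
    · simp [h1, h2]
  · simp [h1]

-- ===== B side, step 1: the streaming pass builds the flat grouped index =====

lemma pv_stream_run (ci : Int) (tokens : List String) (n : Int)
    (L : List (Int × String)) (hL : ∀ p ∈ L, PySem.List.pyGetD tokens p.1 "" = p.2) :
    ∀ (d : PySem.Dict String (List (Int × Int × Int))) (pv : Int),
    L.foldl (pvBStep' ci tokens n) (d, some pv)
      = (((pv :: L.map Prod.fst).zip (L.map Prod.fst)).foldl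
           (fun d ij => d.modify (pvBigram tokens ij) [] (· ++ [(ci, ij.1, n)])) d,
         some ((L.map Prod.fst).getLastD pv)) := by
  induction L with
  | nil => intro d pv; rfl
  | cons x t ih =>
    intro d pv
    rw [List.foldl_cons]
    have hx : PySem.List.pyGetD tokens x.1 "" = x.2 := hL x List.mem_cons_self
    have hstep : pvBStep' ci tokens n (d, some pv) x
        = (d.modify (pvBigram tokens (pv, x.1)) [] (· ++ [(ci, pv, n)]), some x.1) := by
      unfold pvBStep' pvBigram
      simp only [hx]
    rw [hstep, ih (fun p hp => hL p (List.mem_cons_of_mem _ hp))]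
    simp only [List.map_cons, List.zip_cons_cons, List.foldl_cons, List.getLastD_cons]

lemma pv_stream_chapter (ci : Int) (tokens : List String)
    (d : PySem.Dict String (List (Int × Int × Int))) :
    ((PySem.List.enumerate tokens).foldl (pvBStep ci tokens (PySem.List.len tokens)) (d, none)).1
      = (pvPairs tokens).foldl
          (fun d ij => d.modify (pvBigram tokens ij) [] (· ++ [(ci, ij.1, PySem.List.len tokens)])) d := by
  have hfe : (fun (s : PySem.Dict String (List (Int × Int × Int)) × Option Int) (p : Int × String) =>
      if (!(PySem.Set.contains pvDash p.2)) = true then pvBStep' ci tokens (PySem.List.len tokens) s p else s)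
      = pvBStep ci tokens (PySem.List.len tokens) := by
    funext s p
    unfold pvBStep
    by_cases h : PySem.Set.contains pvDash p.2
    · simp
    · simp
  rw [← hfe, ← List.foldl_filter]
  have hL : ∀ p ∈ (PySem.List.enumerate tokens).filter (fun p => !(PySem.Set.contains pvDash p.2)),
      PySem.List.pyGetD tokens p.1 "" = p.2 := by
    intro p hp
    have hpm := List.mem_of_mem_filter hp
    obtain ⟨k, hk, rfl⟩ := pv_mem_enumerate tokens 0 p hpm
    simp only []
    have : ((0 : Int) + (k : Int)) = ((k : Nat) : Int) := by omega
    rw [this, PySem.List.pyGetD_natCast, List.getD_eq_getElem _ _ hk]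
  have hnd : pvNd tokens
      = ((PySem.List.enumerate tokens).filter (fun p => !(PySem.Set.contains pvDash p.2))).map (fun p => p.1) := rfl
  cases hc : (PySem.List.enumerate tokens).filter (fun p => !(PySem.Set.contains pvDash p.2)) with
  | nil =>
    unfold pvPairs
    rw [hnd, hc]
    rfl
  | cons x t =>
    rw [List.foldl_cons]
    have hhead : pvBStep' ci tokens (PySem.List.len tokens) (d, none) x = (d, some x.1) := rfl
    rw [hhead, pv_stream_run ci tokens (PySem.List.len tokens) t
      (fun p hp => hL p (hc ▸ List.mem_cons_of_mem _ hp)) d x.1]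
    unfold pvPairs
    rw [hnd, hc]
    simp only [List.map_cons, List.tail_cons]

lemma pv_groups_eq (chapters : List (List (String × List String))) : ∀ (s : Int)
    (d : PySem.Dict String (List (Int × Int × Int))),
    (PySem.List.enumerate chapters s).foldl (fun groups cich =>
        ((PySem.List.enumerate (pvTok cich.2)).foldl
          (pvBStep cich.1 (pvTok cich.2) (PySem.List.len (pvTok cich.2)))
          (groups, (none : Option Int))).1) d
      = ((PySem.List.enumerate chapters s).flatMap (fun c => pvGRecs c.1 c.2)).foldl
          (fun d p => d.modify p.1 [] (· ++ [p.2])) d := by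
  induction chapters with
  | nil => intro s d; rfl
  | cons ch t ih =>
    intro s d
    rw [PySem.List.enumerate_cons, List.foldl_cons, List.flatMap_cons, List.foldl_append]
    rw [pv_stream_chapter s (pvTok ch) d]
    rw [ih (s + 1)]
    congr 1
    unfold pvGRecs
    rw [List.foldl_map]

-- ===== B side, step 2: keys, groups and values of the index =====

lemma pv_groups_keys (chapters : List (List (String × List String))) :
    ((pvRS chapters).foldl (fun d p => d.modify p.1 [] (· ++ [p.2])) PySem.Dict.empty).keys
      = PySem.Set.ofList (pvBGS chapters) := by
  rw [PySem.Dict.keys_foldl_modify_key (pvRS chapters) Prod.fst [] (fun _ x => (· ++ [x.2]))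
    PySem.Dict.empty]
  rw [PySem.Dict.keys_empty, PySem.Set.update_nil_left]
  rfl

lemma pv_groups_getD (chapters : List (List (String × List String))) (k : String) :
    ((pvRS chapters).foldl (fun d p => d.modify p.1 [] (· ++ [p.2])) PySem.Dict.empty).getD k []
      = ((pvRS chapters).filter (fun p => p.1 == k)).map (fun p => p.2) := by
  rw [PySem.Dict.getD_foldl_modify_append, PySem.Dict.getD_empty]
  rfl

lemma pv_groups_values (chapters : List (List (String × List String))) :
    ((pvRS chapters).foldl (fun d p => d.modify p.1 [] (· ++ [p.2])) PySem.Dict.empty).values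
      = (PySem.Set.ofList (pvBGS chapters)).map
          (fun k => ((pvRS chapters).filter (fun p => p.1 == k)).map (fun p => p.2)) := by
  rw [PySem.Dict.values_eq_map_keys _
    (by rw [pv_groups_keys]; exact PySem.Set.nodup_ofList _) ([] : List (Int × Int × Int))]
  rw [pv_groups_keys]
  apply List.map_congr_left
  intro k _
  exact pv_groups_getD chapters k

-- ===== B side, step 3: reading off the singleton groups is a filter of the flat index =====

lemma pv_filter_len (chapters : List (List (String × List String))) (k : String) :
    ((pvRS chapters).filter (fun p => p.1 == k)).length = (pvBGS chapters).count k := by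
  rw [← List.countP_eq_length_filter]
  unfold pvBGS
  rw [List.count_eq_countP, List.countP_map]
  rfl

lemma pv_vstep_eq (vs : List (PySem.Set Int)) (occs : List (Int × Int × Int)) :
    (if PySem.List.len occs == 1 then
      (if 15 ≤ (PySem.List.pyGetD occs 0 ((0 : Int), (0 : Int), (0 : Int))).2.1 ∧
          (PySem.List.pyGetD occs 0 ((0 : Int), (0 : Int), (0 : Int))).2.1 ≤
            (PySem.List.pyGetD occs 0 ((0 : Int), (0 : Int), (0 : Int))).2.2 - 15 - 1 then
        vs.modify (PySem.List.pyGetD occs 0 ((0 : Int), (0 : Int), (0 : Int))).1.toNat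
          (fun s => PySem.Set.add s (PySem.List.pyGetD occs 0 ((0 : Int), (0 : Int), (0 : Int))).2.1)
      else vs)
    else vs)
      = (if occs.length == 1 then occs else []).foldl pvMStep vs := by
  match occs with
  | [] => rfl
  | [r] =>
    have h1 : (PySem.List.len [r] == (1 : Int)) = true := by
      simp [PySem.List.len_eq]
    have h2 : PySem.List.pyGetD [r] 0 ((0 : Int), (0 : Int), (0 : Int)) = r :=
      PySem.List.pyGetD_zero_cons r [] ((0 : Int), (0 : Int), (0 : Int))
    rw [h1, h2]
    simp only [List.length_cons, List.length_nil]
    rfl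
  | r :: q :: t =>
    have h1 : (PySem.List.len (r :: q :: t) == (1 : Int)) = false := by
      rw [beq_eq_false_iff_ne, PySem.List.len_eq]
      simp only [List.length_cons]
      omega
    have h2 : ((r :: q :: t).length == 1) = false := by
      rw [beq_eq_false_iff_ne]
      simp
    rw [h1, h2]
    rfl

lemma pv_flatMap_filter_ne {β : Type} (s : List String) (a : String) (G : String → List β)
    (h : G a = []) : (s.filter (fun y => !(y == a))).flatMap G = s.flatMap G := by
  induction s with
  | nil => rfl
  | cons y t ih =>
    by_cases hy : y = a
    · subst hy
      rw [List.filter_cons_of_neg (by simp), List.flatMap_cons, h, List.nil_append, ih]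
    · rw [List.filter_cons_of_pos (by simp [hy]), List.flatMap_cons, List.flatMap_cons, ih]

lemma pv_group_flat (RS : List (String × Int × Int × Int)) (P : String → Bool)
    (h : ∀ k, P k = true → (RS.filter (fun p => p.1 == k)).length ≤ 1) :
    (PySem.Set.ofList (RS.map Prod.fst)).flatMap
        (fun k => if P k then RS.filter (fun p => p.1 == k) else [])
      = RS.filter (fun p => P p.1) := by
  induction RS with
  | nil => simp
  | cons p t ih =>
    rw [List.map_cons, PySem.Set.ofList_cons, List.flatMap_cons]
    have hdisc : (PySem.Set.ofList (t.map Prod.fst)).discard p.1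
        = (PySem.Set.ofList (t.map Prod.fst)).filter (fun y => !(y == p.1)) := rfl
    have ht : ∀ k, P k = true → (t.filter (fun q => q.1 == k)).length ≤ 1 := by
      intro k hP
      have h1 := h k hP
      have h2 : (t.filter (fun q => q.1 == k)).length ≤ ((p :: t).filter (fun q => q.1 == k)).length := by
        rw [List.filter_cons]
        split
        · simp
        · exact le_rfl
      omega
    have hconv : ∀ k ∈ (PySem.Set.ofList (t.map Prod.fst)).filter (fun y => !(y == p.1)),
        (if P k then (p :: t).filter (fun q => q.1 == k) else [])
          = (if P k then t.filter (fun q => q.1 == k) else []) := by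
      intro k hk
      have hne : (p.1 == k) = false := by
        have := (List.mem_filter.mp hk).2
        simp only [Bool.not_eq_eq_eq_not, Bool.not_true, beq_eq_false_iff_ne] at this
        exact beq_eq_false_iff_ne.mpr (fun he => this (he.symm))
      rw [List.filter_cons]
      simp only [hne, Bool.false_eq_true, if_false]
    by_cases hP : P p.1 = true
    · -- p's key passes P: its whole group is [p], so p.1 does not occur in t
      have hfil := h p.1 hP
      rw [List.filter_cons] at hfil
      simp only [beq_self_eq_true, if_true, List.length_cons] at hfil
      have htnil : t.filter (fun q => q.1 == p.1) = [] := by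
        rw [← List.length_eq_zero_iff]
        omega
      have hnotin : p.1 ∉ t.map Prod.fst := by
        intro hmem
        obtain ⟨q, hq, hq1⟩ := List.mem_map.mp hmem
        have : q ∈ t.filter (fun q => q.1 == p.1) := List.mem_filter.mpr ⟨hq, by simp [hq1]⟩
        rw [htnil] at this
        exact List.not_mem_nil this
      have hdid : (PySem.Set.ofList (t.map Prod.fst)).discard p.1
          = PySem.Set.ofList (t.map Prod.fst) := by
        rw [hdisc]
        apply List.filter_eq_self.mpr
        intro y hy
        have hmem : y ∈ t.map Prod.fst := (PySem.Set.mem_ofList _ _).mp hy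
        simp only [Bool.not_eq_eq_eq_not, Bool.not_true, beq_eq_false_iff_ne]
        exact fun he => hnotin (he ▸ hmem)
      have hconv2 : ∀ k ∈ PySem.Set.ofList (t.map Prod.fst),
          (if P k then (p :: t).filter (fun q => q.1 == k) else [])
            = (if P k then t.filter (fun q => q.1 == k) else []) := by
        intro k hk
        apply hconv
        rw [← hdisc, hdid]
        exact hk
      rw [hdid, List.flatMap_congr hconv2, ih ht]
      rw [if_pos hP]
      simp [htnil, hP]
    · -- p's key fails P: p contributes nothing, and its key's group is dropped on both sides
      rw [if_neg hP, List.nil_append, hdisc]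
      rw [List.flatMap_congr hconv]
      rw [pv_flatMap_filter_ne _ _ _ (by rw [if_neg hP])]
      rw [ih ht, List.filter_cons]
      simp only [hP, Bool.false_eq_true, if_false]

-- ===== B side, step 4: slot assembly over the chapters =====

lemma pv_modify_append_cons {α : Type} (pref : List α) (x : α) (suff : List α) (f : α → α) :
    (pref ++ x :: suff).modify pref.length f = pref ++ f x :: suff := by
  induction pref with
  | nil => simp
  | cons a t ih =>
    rw [List.cons_append, List.length_cons, List.modify_succ_cons, ih, List.cons_append]

lemma pv_fold_slot (rs : List (String × Int × Int × Int)) (c : Nat)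
    (h : ∀ r ∈ rs, r.2.1 = (c : Int)) (pref : List (PySem.Set Int)) (hp : pref.length = c)
    (x : PySem.Set Int) (suff : List (PySem.Set Int)) :
    rs.foldl pvSlot (pref ++ x :: suff)
      = pref ++ (rs.foldl (fun x r => PySem.Set.add x r.2.2.1) x) :: suff := by
  induction rs generalizing x with
  | nil => rfl
  | cons r t ih =>
    rw [List.foldl_cons, List.foldl_cons]
    have hr : r.2.1 = (c : Int) := h r List.mem_cons_self
    unfold pvSlot
    rw [hr]
    have : ((c : Int)).toNat = pref.length := by omega
    rw [this, pv_modify_append_cons]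
    exact ih (fun r hr => h r (List.mem_cons_of_mem _ hr)) _

lemma pv_chap_fold (chapters : List (List (String × List String))) (ci : Int)
    (ch : List (String × List String)) (x : PySem.Set Int) :
    ((pvGRecs ci ch).filter (pvCond chapters)).foldl (fun x r => PySem.Set.add x r.2.2.1) x
      = ((pvPairs (pvTok ch)).filter (pvOK chapters (pvTok ch))).foldl
          (fun x ij => PySem.Set.add x ij.1) x := by
  unfold pvGRecs
  rw [List.filter_map, List.foldl_map]
  rfl

lemma pv_final_assemble (chapters : List (List (String × List String)))
    (chs : List (List (String × List String))) (pref : List (PySem.Set Int)) :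
    ((PySem.List.enumerate chs (pref.length : Int)).flatMap
        (fun c => (pvGRecs c.1 c.2).filter (pvCond chapters))).foldl pvSlot
        (pref ++ chs.map (fun _ => PySem.Set.empty))
      = pref ++ chs.map (fun ch => pvChapSet chapters ch) := by
  induction chs generalizing pref with
  | nil => simp [PySem.List.enumerate]
  | cons ch t ih =>
    rw [PySem.List.enumerate_cons, List.flatMap_cons, List.foldl_append]
    rw [List.map_cons, List.map_cons]
    have hmem : ∀ r ∈ (pvGRecs (pref.length : Int) ch).filter (pvCond chapters),
        r.2.1 = ((pref.length : Nat) : Int) := by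
      intro r hr
      have := List.mem_of_mem_filter hr
      unfold pvGRecs at this
      obtain ⟨ij, _, rfl⟩ := List.mem_map.mp this
      rfl
    rw [pv_fold_slot _ pref.length hmem pref rfl]
    rw [pv_chap_fold chapters _ ch]
    have h2 := ih (pref ++ [pvChapSet chapters ch])
    rw [List.length_append] at h2
    simp only [List.length_cons, List.length_nil, Nat.zero_add] at h2
    have hc : ((pref.length + 1 : Nat) : Int) = (pref.length : Int) + 1 := by push_cast; ring
    rw [hc] at h2
    rw [List.append_assoc, List.singleton_append] at h2
    rw [List.append_assoc, List.singleton_append] at h2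
    exact h2

-- ===== both programs equal the canonical per-chapter description =====

lemma pv_A_eq (chapters : List (List (String × List String))) :
    compute_valid_starts chapters = chapters.map (fun ch => pvChapSet chapters ch) := by
  unfold compute_valid_starts
  simp only []
  rw [pv_counterA_eq]
  rw [PySem.List.foldl_append_singleton_eq_map]
  simp only [List.nil_append]
  apply List.map_congr_left
  intro ch _
  exact pv_chapsetA chapters ch

lemma pv_mstep_cond (chapters : List (List (String × List String))) :
    (fun (vs : List (PySem.Set Int)) (p : String × Int × Int × Int) =>
      if ((pvBGS chapters).count p.1 == 1) = true then pvMStep vs p.2 else vs)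
      = (fun vs p => if pvCond chapters p then pvSlot vs p else vs) := by
  funext vs p
  by_cases h1 : ((pvBGS chapters).count p.1 == 1) = true
  · by_cases h2 : 15 ≤ p.2.2.1
    · by_cases h3 : p.2.2.1 ≤ p.2.2.2 - 15 - 1
      · simp [pvMStep, pvSlot, pvCond, h1, h2, h3]
      · simp [pvMStep, pvCond, h1, h2, h3]
    · simp [pvMStep, pvCond, h1, h2]
  · simp [pvCond, h1]

lemma pv_B_eq (chapters : List (List (String × List String))) :
    compute_valid_starts_alt chapters = chapters.map (fun ch => pvChapSet chapters ch) := by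
  unfold compute_valid_starts_alt
  simp only []
  rw [pv_groups_eq chapters 0 PySem.Dict.empty]
  have hRS : (PySem.List.enumerate chapters).flatMap (fun c => pvGRecs c.1 c.2) = pvRS chapters := rfl
  rw [hRS, pv_groups_values]
  have hbody : (fun (vs : List (PySem.Set Int)) (occs : List (Int × Int × Int)) =>
      if PySem.List.len occs == 1 then
        (if 15 ≤ (PySem.List.pyGetD occs 0 ((0 : Int), (0 : Int), (0 : Int))).2.1 ∧
            (PySem.List.pyGetD occs 0 ((0 : Int), (0 : Int), (0 : Int))).2.1 ≤
              (PySem.List.pyGetD occs 0 ((0 : Int), (0 : Int), (0 : Int))).2.2 - 15 - 1 then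
          vs.modify (PySem.List.pyGetD occs 0 ((0 : Int), (0 : Int), (0 : Int))).1.toNat
            (fun s => PySem.Set.add s (PySem.List.pyGetD occs 0 ((0 : Int), (0 : Int), (0 : Int))).2.1)
        else vs)
      else vs)
      = (fun vs occs => (if occs.length == 1 then occs else []).foldl pvMStep vs) := by
    funext vs occs
    exact pv_vstep_eq vs occs
  rw [hbody]
  rw [← List.foldl_flatMap]
  rw [List.flatMap_map]
  have hpick : (fun k => if (((pvRS chapters).filter (fun p => p.1 == k)).map (fun p => p.2)).length == 1
        then ((pvRS chapters).filter (fun p => p.1 == k)).map (fun p => p.2) else [])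
      = (fun k => ((if ((pvBGS chapters).count k == 1) = true then (pvRS chapters).filter (fun p => p.1 == k) else []).map (fun p => p.2))) := by
    funext k
    rw [List.length_map, pv_filter_len]
    rw [apply_ite (List.map (fun (p : String × Int × Int × Int) => p.2))]
    simp only [List.map_nil]
  rw [hpick]
  rw [← List.map_flatMap]
  have hbgs : pvBGS chapters = (pvRS chapters).map Prod.fst := rfl
  rw [hbgs]
  rw [pv_group_flat (pvRS chapters) (fun k => ((pvRS chapters).map Prod.fst).count k == 1)
    (by
      intro k hk
      rw [pv_filter_len, hbgs]
      have h1 := beq_iff_eq.mp hk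
      omega)]
  rw [List.foldl_map, List.foldl_filter]
  rw [← hbgs, pv_mstep_cond chapters]
  rw [← List.foldl_filter]
  have hsplit : (pvRS chapters).filter (pvCond chapters)
      = (PySem.List.enumerate chapters).flatMap (fun c => (pvGRecs c.1 c.2).filter (pvCond chapters)) := by
    rw [← hRS]
    exact List.filter_flatMap
  rw [hsplit]
  have hfin := pv_final_assemble chapters chapters []
  simp only [List.length_nil, Nat.cast_zero, List.nil_append] at hfin
  exact hfin

-- ===== VERDICT (by name: the statement is the Claim_ definition above) =====
theorem compute_valid_starts_spec : Claim_equal_compute_valid_starts := by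
  intro chapters _hdom _hpre
  unfold Spec_compute_valid_starts
  rw [pv_A_eq, pv_B_eq]
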